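-- pv_equiv track=rewrite | github.com/mesoSPIM/mesoSPIM-control | mesoSPIM/src/devices/stages/galil/galilcontrol.py | _convert_dict_to_galil_string
-- ===== SOURCE A (Python) =====
-- def _convert_dict_to_galil_string(command_dict, length, zero_padding=False):
--     '''Converts a dict of the form {1: 4000, 3:-234} into a string '4000,,-234'
--     which can be combined with a command ('RP4000,,-234') and sent to the stage controller.
--
--     Args:
--         command_dict (dict): Command dictionary in the form {key (int): command value (int)}
--         length (int): Length of output items
--         zero_padding (bool): Indicates whether the values between commas should be filled with zeros
--
--     Returns:
--         galil_string (str): String with values between separating commas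
--     '''
--     keylist = list(command_dict.keys())
--     keylist.sort()
--
--     galil_string = ''
--
--     for i in range(length):
--         if i+1 in keylist:
--             galil_string += str(command_dict[i+1])
--             galil_string += ','
--         else:
--             if zero_padding == True:
--                 galil_string += '0'
--             galil_string += ','
--     return galil_string
-- ===== SOURCE B (Python) =====
-- def _convert_dict_to_galil_string(command_dict, length, zero_padding=False):
--     '''Scatter the dict values into a preallocated table of parts, then join.'''
--     parts = ['0' if zero_padding == True else ''] * length
--     for key, value in command_dict.items():
--         if 1 <= key <= length:
--             parts[key - 1] = str(value)
--     return ','.join(parts + [''])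
-- ===== Notes on version B (the rewrite author's own statement) =====
-- stated objective: faster
-- what changed: B preallocates a table of length parts and scatters each dict value to its slot in one pass over the items, then joins once with a trailing comma, instead of A's loop over every index with a membership scan of the sorted key list and repeated string concatenation.
import Mathlib
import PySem

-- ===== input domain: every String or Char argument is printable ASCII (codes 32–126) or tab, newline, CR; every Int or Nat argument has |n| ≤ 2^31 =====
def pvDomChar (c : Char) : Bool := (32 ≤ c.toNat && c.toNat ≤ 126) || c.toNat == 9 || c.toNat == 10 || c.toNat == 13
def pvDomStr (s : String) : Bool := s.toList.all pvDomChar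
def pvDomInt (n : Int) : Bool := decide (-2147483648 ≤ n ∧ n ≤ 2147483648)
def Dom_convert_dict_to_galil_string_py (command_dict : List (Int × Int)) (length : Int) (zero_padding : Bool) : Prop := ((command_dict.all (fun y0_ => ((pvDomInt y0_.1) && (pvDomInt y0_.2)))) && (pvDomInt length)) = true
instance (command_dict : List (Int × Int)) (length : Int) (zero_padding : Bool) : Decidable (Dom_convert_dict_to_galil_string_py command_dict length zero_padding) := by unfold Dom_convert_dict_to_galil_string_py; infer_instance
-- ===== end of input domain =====

-- B scatters the dict values into a preallocated table of parts and joins once, instead of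
-- A's per-index membership scan over the sorted key list (objective: faster, O(length+keys) vs O(length·keys)).

-- ===== PORT A =====
def convert_dict_to_galil_string_py (command_dict : List (Int × Int)) (length : Int) (zero_padding : Bool) : String :=
  let d := PySem.Dict.ofList command_dict
  let keylist := PySem.List.sorted d.keys (fun x => x) false   -- keylist = list(command_dict.keys()); keylist.sort()
  let galil := (PySem.List.pyRange 0 length 1).foldl
    (fun g i =>
      if (i + 1) ∈ keylist then
        (g ++ PySem.Int.toChars (d.getD (i + 1) 0)) ++ [',']   -- command_dict[i+1]: membership makes getD exact
      else
        (if zero_padding == true then g ++ ['0'] else g) ++ [','])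
    ([] : List Char)
  String.ofList galil

-- ===== PORT B =====
def convert_dict_to_galil_string_py_alt (command_dict : List (Int × Int)) (length : Int) (zero_padding : Bool) : String :=
  let d := PySem.Dict.ofList command_dict
  let parts0 : List (List Char) := List.replicate length.toNat (if zero_padding == true then ['0'] else [])
  let parts := d.items.foldl
    (fun ps kv => if 1 ≤ kv.1 ∧ kv.1 ≤ length then ps.set (kv.1 - 1).toNat (PySem.Int.toChars kv.2) else ps)
    parts0
  String.ofList (PySem.Chars.join [','] (parts ++ [[]]))

-- ===== PRECONDITION & SPEC =====
def Spec_convert_dict_to_galil_string_py (command_dict : List (Int × Int)) (length : Int) (zero_padding : Bool) (out : String) : Prop := out = convert_dict_to_galil_string_py_alt command_dict length zero_padding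
instance (command_dict : List (Int × Int)) (length : Int) (zero_padding : Bool) (out : String) : Decidable (Spec_convert_dict_to_galil_string_py command_dict length zero_padding out) := by unfold Spec_convert_dict_to_galil_string_py; infer_instance

-- ===== CLAIM (what is proved, stated in full; the proofs are below) =====
def Claim_equal_convert_dict_to_galil_string_py : Prop := ∀ (command_dict : List (Int × Int)) (length : Int) (zero_padding : Bool), Dom_convert_dict_to_galil_string_py command_dict length zero_padding → Spec_convert_dict_to_galil_string_py command_dict length zero_padding (convert_dict_to_galil_string_py command_dict length zero_padding)

-- ===== LEMMAS AND PROOFS =====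

-- ','.join(parts + ['']) is the concatenation of each part followed by a comma.
lemma join_comma_append_nil (parts : List (List Char)) :
    PySem.Chars.join [','] (parts ++ [[]]) = parts.flatMap (fun p => p ++ [',']) := by
  induction parts with
  | nil => simp [PySem.Chars.join_singleton]
  | cons p ps ih =>
      cases ps with
      | nil => simp [PySem.Chars.join_cons_cons, PySem.Chars.join_singleton]
      | cons q qs =>
          rw [List.cons_append, List.cons_append, PySem.Chars.join_cons_cons,
              ← List.cons_append, ih]
          simp

-- The scatter loop preserves length.
lemma scatter_length (length : Int) (items : List (Int × Int)) (ps : List (List Char)) :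
    (items.foldl (fun ps kv =>
        if 1 ≤ kv.1 ∧ kv.1 ≤ length then ps.set (kv.1 - 1).toNat (PySem.Int.toChars kv.2) else ps)
      ps).length = ps.length := by
  induction items generalizing ps with
  | nil => rfl
  | cons kv rest ih =>
      simp only [List.foldl_cons]
      rw [ih]
      split <;> simp

-- What the scatter loop leaves at slot j (keys of items distinct, ps has length.toNat slots).
lemma scatter_getD (length : Int) (items : List (Int × Int)) (ps : List (List Char))
    (j : Nat) (dflt : List Char)
    (hnd : (items.map Prod.fst).Nodup) (hps : ps.length = length.toNat) (hj : j < length.toNat) :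
    (items.foldl (fun ps kv =>
        if 1 ≤ kv.1 ∧ kv.1 ≤ length then ps.set (kv.1 - 1).toNat (PySem.Int.toChars kv.2) else ps)
      ps).getD j dflt =
      match items.find? (fun kv => kv.1 == (j : Int) + 1) with
      | some kv => PySem.Int.toChars kv.2
      | none => ps.getD j dflt := by
  induction items generalizing ps with
  | nil => rfl
  | cons kv rest ih =>
      simp only [List.map_cons, List.nodup_cons] at hnd
      have hlen : (1 : Int) ≤ length := by omega
      simp only [List.foldl_cons, List.find?_cons]
      by_cases hk : kv.1 = (j : Int) + 1
      · have hguard : (1 : Int) ≤ kv.1 ∧ kv.1 ≤ length := by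
          constructor <;> omega
        have hidx : (kv.1 - 1).toNat = j := by omega
        rw [if_pos hguard, hidx]
        have hfind : rest.find? (fun kv => kv.1 == (j : Int) + 1) = none := by
          rw [List.find?_eq_none]
          intro x hx hbeq
          exact hnd.1 (by
            have : x.1 = (j : Int) + 1 := by simpa using hbeq
            rw [hk, ← this]
            exact List.mem_map_of_mem hx)
        rw [ih (ps.set j (PySem.Int.toChars kv.2)) hnd.2 (by simp [hps]), hfind]
        simp only [hk]
        rw [List.getD_eq_getElem?_getD, List.getElem?_set_self (by omega)]
        simp
      · have hbeq : (kv.1 == (j : Int) + 1) = false := by simpa using hk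
        rw [hbeq]
        by_cases hguard : (1 : Int) ≤ kv.1 ∧ kv.1 ≤ length
        · rw [if_pos hguard, ih _ hnd.2 (by simp [hps])]
          have hne : (kv.1 - 1).toNat ≠ j := by omega
          rw [List.getD_eq_getElem?_getD, List.getElem?_set_ne hne, ← List.getD_eq_getElem?_getD]
        · rw [if_neg hguard, ih _ hnd.2 hps]

-- At each slot, A's per-index decision agrees with B's scattered table.
lemma slot_eq (command_dict : List (Int × Int)) (zero_padding : Bool) (j : Nat) :
    (if ((j : Int) + 1) ∈ PySem.List.sorted (PySem.Dict.ofList command_dict).keys (fun x => x) false then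
        PySem.Int.toChars ((PySem.Dict.ofList command_dict).getD ((j : Int) + 1) 0)
      else (if zero_padding == true then ['0'] else [])) =
    match (PySem.Dict.ofList command_dict).items.find? (fun kv => kv.1 == (j : Int) + 1) with
    | some kv => PySem.Int.toChars kv.2
    | none => (if zero_padding == true then ['0'] else []) := by
  set d := PySem.Dict.ofList command_dict with hd
  have hnd : d.keys.Nodup := PySem.Dict.nodup_keys_ofList command_dict
  simp only [PySem.List.mem_sorted]
  by_cases hmem : ((j : Int) + 1) ∈ d.keys
  · rw [if_pos hmem]
    have : ∃ v, ((j : Int) + 1, v) ∈ d.items := by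
      simpa [PySem.Dict.keys, List.mem_map, Prod.ext_iff] using hmem
    obtain ⟨v, hv⟩ := this
    have hfind : ∃ kv, d.items.find? (fun kv => kv.1 == (j : Int) + 1) = some kv := by
      have : (d.items.find? (fun kv => kv.1 == (j : Int) + 1)).isSome := by
        rw [List.find?_isSome]
        exact ⟨_, hv, by simp⟩
      exact Option.isSome_iff_exists.mp this
    obtain ⟨kv, hkv⟩ := hfind
    rw [hkv]
    have hk1 : kv.1 = (j : Int) + 1 := by simpa using List.find?_some hkv
    have hmemkv : (kv.1, kv.2) ∈ d.items := by simpa using List.mem_of_find?_eq_some hkv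
    have hget : d.get? kv.1 = some kv.2 := PySem.Dict.get?_of_mem_items d hmemkv hnd
    rw [← hk1, PySem.Dict.getD_eq_get?_getD, hget]
    rfl
  · rw [if_neg hmem]
    have hfind : d.items.find? (fun kv => kv.1 == (j : Int) + 1) = none := by
      rw [List.find?_eq_none]
      intro x hx hbeq
      exact hmem (by
        have : x.1 = (j : Int) + 1 := by simpa using hbeq
        rw [← this]
        simpa [PySem.Dict.keys] using List.mem_map_of_mem (f := Prod.fst) hx)
    rw [hfind]

-- ===== VERDICT (by name: the statement is the Claim_ definition above) =====
theorem convert_dict_to_galil_string_py_spec : Claim_equal_convert_dict_to_galil_string_py := by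
  intro command_dict length zero_padding _
  unfold Spec_convert_dict_to_galil_string_py
  unfold convert_dict_to_galil_string_py convert_dict_to_galil_string_py_alt
  simp only []
  set d := PySem.Dict.ofList command_dict with hd
  set init : List Char := if zero_padding == true then ['0'] else [] with hinit
  set keylist := PySem.List.sorted d.keys (fun x => x) false with hkl
  set n := length.toNat with hn
  -- A's loop as a flatMap over indices
  have hA : (PySem.List.pyRange 0 length 1).foldl
      (fun g i =>
        if (i + 1) ∈ keylist then (g ++ PySem.Int.toChars (d.getD (i + 1) 0)) ++ [',']
        else (if zero_padding == true then g ++ ['0'] else g) ++ [','])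
      ([] : List Char)
      = (List.range n).flatMap (fun (j : Nat) =>
          (if ((j : Int) + 1) ∈ keylist then PySem.Int.toChars (d.getD ((j : Int) + 1) 0) else init) ++ [',']) := by
    have hfun : (fun (g : List Char) (i : Int) =>
        if (i + 1) ∈ keylist then (g ++ PySem.Int.toChars (d.getD (i + 1) 0)) ++ [',']
        else (if zero_padding == true then g ++ ['0'] else g) ++ [','])
        = fun g i => g ++ ((if (i + 1) ∈ keylist then PySem.Int.toChars (d.getD (i + 1) 0) else init) ++ [',']) := by
      funext g i
      by_cases h : (i + 1) ∈ keylist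
      · simp [h]
      · cases zero_padding <;> simp [h, hinit]
    rw [hfun, PySem.List.foldl_append_eq_flatMap, List.nil_append,
        PySem.List.pyRange_one, List.flatMap_map]
    simp only [zero_add, sub_zero, hn]
  -- B's table, described slot by slot
  set parts := d.items.foldl
      (fun ps kv => if 1 ≤ kv.1 ∧ kv.1 ≤ length then ps.set (kv.1 - 1).toNat (PySem.Int.toChars kv.2) else ps)
      (List.replicate n init) with hparts
  have hndfst : (d.items.map Prod.fst).Nodup := PySem.Dict.nodup_keys_ofList command_dict
  have hlenparts : parts.length = n := by
    rw [hparts, scatter_length]; simp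
  have hBtable : parts = (List.range n).map (fun (j : Nat) =>
      match d.items.find? (fun kv => kv.1 == (j : Int) + 1) with
      | some kv => PySem.Int.toChars kv.2
      | none => init) := by
    apply List.ext_getElem
    · simp [hlenparts]
    · intro j h1 h2
      have hj : j < n := by simpa [hlenparts] using h1
      have hsc := scatter_getD length d.items (List.replicate n init) j [] hndfst
        (by simp [hn]) (by rw [← hn]; exact hj)
      rw [← hparts] at hsc
      rw [← List.getD_eq_getElem _ [] h1, hsc, List.getElem_map, List.getElem_range]
      cases hfind : d.items.find? (fun kv => kv.1 == (j : Int) + 1) with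
      | some kv => simp
      | none =>
          simp only []
          rw [List.getD_eq_getElem?_getD, List.getElem?_replicate]
          simp [hj]
  rw [hA, hBtable, join_comma_append_nil, List.flatMap_map]
  congr 1
  apply List.flatMap_congr
  intro j _
  exact congrArg (· ++ [',']) (slot_eq command_dict zero_padding j)
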